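-- pv_equiv track=rewrite | github.com/iansedano/aoc | python/src/aoc/2023/14.py | get_cols
-- ===== SOURCE A (Python) =====
-- def get_cols(balls, cubes, shape):
--     cols = []
--     for x in range(shape[0]):
--         col = []
--         for y in range(shape[1]):
--             pos = (x, y)
--             if pos in balls:
--                 col.append(("O", y))
--             elif pos in cubes:
--                 col.append(("#", y))
--         cols.append(col)
--     return cols
-- ===== SOURCE B (Python) =====
-- def get_cols(balls, cubes, shape):
--     w = shape[0]
--     if w <= 0:
--         return []
--     h = shape[1]
--     buckets = {}
--     for x, y in cubes:
--         if 0 <= x < w and 0 <= y < h: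
--             buckets.setdefault(x, {})[y] = "#"
--     for x, y in balls:
--         if 0 <= x < w and 0 <= y < h:
--             buckets.setdefault(x, {})[y] = "O"
--     cols = []
--     for x in range(w):
--         col = buckets.get(x, {})
--         cols.append([(col[y], y) for y in sorted(col)])
--     return cols
-- ===== Notes on version B (the rewrite author's own statement) =====
-- stated objective: faster
-- what changed: Instead of scanning the whole W*H grid and testing each cell for list membership, B buckets cubes then balls into a dict of per-column dicts keyed by x and y (balls overwrite cubes) and emits each column by sorting its keys.
import Mathlib
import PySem

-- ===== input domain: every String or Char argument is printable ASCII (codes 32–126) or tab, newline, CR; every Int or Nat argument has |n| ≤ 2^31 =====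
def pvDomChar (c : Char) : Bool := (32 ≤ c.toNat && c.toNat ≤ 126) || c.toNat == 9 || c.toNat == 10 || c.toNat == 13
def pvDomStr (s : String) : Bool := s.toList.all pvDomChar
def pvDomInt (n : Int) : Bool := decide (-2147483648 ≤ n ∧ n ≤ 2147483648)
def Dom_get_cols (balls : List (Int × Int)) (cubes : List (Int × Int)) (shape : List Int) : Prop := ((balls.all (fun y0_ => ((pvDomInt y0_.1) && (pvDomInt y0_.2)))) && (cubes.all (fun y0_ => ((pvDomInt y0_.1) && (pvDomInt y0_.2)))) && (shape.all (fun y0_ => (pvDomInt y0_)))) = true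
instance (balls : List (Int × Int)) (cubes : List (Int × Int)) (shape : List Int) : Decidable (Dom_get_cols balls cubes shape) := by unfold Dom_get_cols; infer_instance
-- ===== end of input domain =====

-- B replaces A's full W*H grid scan (with a list-membership test per cell) by bucketing
-- cubes then balls into a dict of per-column dicts and sorting each column's keys: asymptotically faster.

-- ===== PORT A =====
def get_cols (balls : List (Int × Int)) (cubes : List (Int × Int)) (shape : List Int) : List (List (String × Int)) :=
  -- shape[0] / shape[1]: Pre_ excludes the inputs where Python raises IndexError, so the getD 0 default is never used
  (PySem.List.pyRange 0 ((PySem.List.pyGet? shape 0).getD 0) 1).foldl (fun cols x =>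
    let col := (PySem.List.pyRange 0 ((PySem.List.pyGet? shape 1).getD 0) 1).foldl (fun col y =>
      if (x, y) ∈ balls then col ++ [("O", y)]
      else if (x, y) ∈ cubes then col ++ [("#", y)]
      else col) []
    cols ++ [col]) []

-- ===== PORT B =====
-- buckets.setdefault(x, {})[y] = s  is  modify x empty (insert y s)
def pvBStep (w h : Int) (s : String) (d : PySem.Dict Int (PySem.Dict Int String)) (p : Int × Int) : PySem.Dict Int (PySem.Dict Int String) :=
  if 0 ≤ p.1 ∧ p.1 < w ∧ 0 ≤ p.2 ∧ p.2 < h then d.modify p.1 PySem.Dict.empty (fun c => c.insert p.2 s) else d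

def get_cols_alt (balls : List (Int × Int)) (cubes : List (Int × Int)) (shape : List Int) : List (List (String × Int)) :=
  let w := (PySem.List.pyGet? shape 0).getD 0   -- Pre_ excludes the IndexError inputs
  if w ≤ 0 then []
  else
    let h := (PySem.List.pyGet? shape 1).getD 0
    let bk := balls.foldl (pvBStep w h "O") (cubes.foldl (pvBStep w h "#") PySem.Dict.empty)
    (PySem.List.pyRange 0 w 1).map (fun x =>
      let col := bk.getD x PySem.Dict.empty
      -- Python's col[y] cannot raise: y ranges over col's keys; getD "" is exact there
      (PySem.List.sorted col.keys (fun y => y) false).map (fun y => (col.getD y "", y)))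

-- ===== PRECONDITION & SPEC =====
-- Pre_ excludes exactly the inputs where A raises IndexError: an empty shape, or a
-- one-element shape with shape[0] > 0 (the loop body then reads the missing shape[1]).
def Pre_get_cols (balls : List (Int × Int)) (cubes : List (Int × Int)) (shape : List Int) : Prop :=
  1 ≤ shape.length ∧ (shape[0]! ≤ 0 ∨ 2 ≤ shape.length)
instance (balls : List (Int × Int)) (cubes : List (Int × Int)) (shape : List Int) : Decidable (Pre_get_cols balls cubes shape) := by unfold Pre_get_cols; infer_instance
def pvWitness_get_cols : (List (Int × Int)) × (List (Int × Int)) × List Int := ([(0, 1)], [(0, 0)], [2, 2])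

def Spec_get_cols (balls : List (Int × Int)) (cubes : List (Int × Int)) (shape : List Int) (out : List (List (String × Int))) : Prop := out = get_cols_alt balls cubes shape
instance (balls : List (Int × Int)) (cubes : List (Int × Int)) (shape : List Int) (out : List (List (String × Int))) : Decidable (Spec_get_cols balls cubes shape out) := by unfold Spec_get_cols; infer_instance

-- ===== CLAIM (what is proved, stated in full; the proofs are below) =====
def Claim_equal_get_cols : Prop := ∀ (balls : List (Int × Int)) (cubes : List (Int × Int)) (shape : List Int), Dom_get_cols balls cubes shape → Pre_get_cols balls cubes shape → Spec_get_cols balls cubes shape (get_cols balls cubes shape)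

-- ===== LEMMAS AND PROOFS =====

-- lookup into the bucket-of-dicts after one bucketing fold
theorem pvFold_get (w h : Int) (s : String) (l : List (Int × Int))
    (d : PySem.Dict Int (PySem.Dict Int String)) (x y : Int) :
    (((l.foldl (pvBStep w h s) d).getD x PySem.Dict.empty).get? y)
      = if 0 ≤ x ∧ x < w ∧ 0 ≤ y ∧ y < h ∧ (x, y) ∈ l then some s
        else ((d.getD x PySem.Dict.empty).get? y) := by
  induction l generalizing d with
  | nil => simp
  | cons p t ih =>
    obtain ⟨a, b⟩ := p
    simp only [List.foldl_cons, ih, pvBStep]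
    by_cases hg : 0 ≤ a ∧ a < w ∧ 0 ≤ b ∧ b < h
    · rw [if_pos hg]
      by_cases ht : 0 ≤ x ∧ x < w ∧ 0 ≤ y ∧ y < h ∧ (x, y) ∈ t
      · rw [if_pos ht,
          if_pos ⟨ht.1, ht.2.1, ht.2.2.1, ht.2.2.2.1, List.mem_cons_of_mem _ ht.2.2.2.2⟩]
      · rw [if_neg ht, PySem.Dict.getD_modify]
        have hC : ¬(x = a ∧ y = b) → ¬(0 ≤ x ∧ x < w ∧ 0 ≤ y ∧ y < h ∧ (x, y) ∈ (a, b) :: t) := by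
          rintro hxy ⟨h1, h2, h3, h4, hm⟩
          rcases List.mem_cons.mp hm with he | hm'
          · exact hxy ⟨(Prod.mk.injEq .. ▸ he).1, (Prod.mk.injEq .. ▸ he).2⟩
          · exact ht ⟨h1, h2, h3, h4, hm'⟩
        by_cases hx : x = a
        · rw [if_pos hx, PySem.Dict.get?_insert]
          by_cases hy : y = b
          · subst hx; subst hy
            rw [if_pos rfl, if_pos ⟨hg.1, hg.2.1, hg.2.2.1, hg.2.2.2, List.mem_cons_self⟩]
          · rw [if_neg hy, if_neg (hC fun hp => hy hp.2), hx]
        · rw [if_neg hx, if_neg (hC fun hp => hx hp.1)]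
    · rw [if_neg hg]
      have hiff : (0 ≤ x ∧ x < w ∧ 0 ≤ y ∧ y < h ∧ (x, y) ∈ t)
          ↔ (0 ≤ x ∧ x < w ∧ 0 ≤ y ∧ y < h ∧ (x, y) ∈ (a, b) :: t) := by
        constructor
        · rintro ⟨h1, h2, h3, h4, hm⟩
          exact ⟨h1, h2, h3, h4, List.mem_cons_of_mem _ hm⟩
        · rintro ⟨h1, h2, h3, h4, hm⟩
          rcases List.mem_cons.mp hm with he | hm'
          · obtain ⟨hx, hy⟩ := Prod.mk.injEq .. ▸ he
            exact absurd ⟨hx ▸ h1, hx ▸ h2, hy ▸ h3, hy ▸ h4⟩ hg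
          · exact ⟨h1, h2, h3, h4, hm'⟩
      rw [if_congr hiff rfl rfl]

-- inner dicts keep Nodup keys through a bucketing fold
theorem pvFold_nodup (w h : Int) (s : String) (l : List (Int × Int))
    (d : PySem.Dict Int (PySem.Dict Int String))
    (hd : ∀ x, ((d.getD x PySem.Dict.empty).keys).Nodup) :
    ∀ x, (((l.foldl (pvBStep w h s) d).getD x PySem.Dict.empty).keys).Nodup := by
  induction l generalizing d with
  | nil => exact hd
  | cons p t ih =>
    refine ih _ (fun x => ?_)
    simp only [pvBStep]
    split_ifs with hg
    · rw [PySem.Dict.getD_modify]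
      split_ifs with hx
      · exact PySem.Dict.nodup_keys_insert _ _ _ (hd _)
      · exact hd x
    · exact hd x

theorem pvPyRange_pairwise (b : Int) : (PySem.List.pyRange 0 b).Pairwise (· < ·) := by
  by_cases hb : 0 ≤ b
  · obtain ⟨n, rfl⟩ : ∃ n : Nat, b = (n : Int) := ⟨b.toNat, (Int.toNat_of_nonneg hb).symm⟩
    rw [PySem.List.pyRange_zero_natCast]
    exact (List.pairwise_lt_range).map _ (fun a b h => by exact_mod_cast h)
  · have : PySem.List.pyRange 0 b = [] := by
      rw [List.eq_nil_iff_forall_not_mem]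
      intro y hy
      have := PySem.List.mem_pyRange_one.mp hy
      omega
    simp [this]

-- one column: A's y-scan equals B's sorted bucket
theorem pvCol_eq (balls cubes : List (Int × Int)) (w h x : Int) (hx : 0 ≤ x ∧ x < w) :
    (PySem.List.pyRange 0 h).foldl (fun col y =>
        if (x, y) ∈ balls then col ++ [("O", y)]
        else if (x, y) ∈ cubes then col ++ [("#", y)] else col) []
    = (PySem.List.sorted ((balls.foldl (pvBStep w h "O")
          (cubes.foldl (pvBStep w h "#") PySem.Dict.empty)).getD x PySem.Dict.empty).keys
        (fun y => y) false).map
        (fun y => (((balls.foldl (pvBStep w h "O")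
          (cubes.foldl (pvBStep w h "#") PySem.Dict.empty)).getD x PySem.Dict.empty).getD y "", y)) := by
  set col := (balls.foldl (pvBStep w h "O")
      (cubes.foldl (pvBStep w h "#") PySem.Dict.empty)).getD x PySem.Dict.empty with hcol
  have hget : ∀ y, col.get? y
      = if 0 ≤ y ∧ y < h ∧ (x, y) ∈ balls then some "O"
        else if 0 ≤ y ∧ y < h ∧ (x, y) ∈ cubes then some "#" else none := by
    intro y
    rw [hcol, pvFold_get, pvFold_get]
    simp only [PySem.Dict.getD_empty, PySem.Dict.get?_empty]
    by_cases h1 : 0 ≤ y ∧ y < h ∧ (x, y) ∈ balls <;>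
      by_cases h2 : 0 ≤ y ∧ y < h ∧ (x, y) ∈ cubes <;>
      split_ifs <;> first | rfl | (exfalso; tauto)
  have hnod : col.keys.Nodup := by
    rw [hcol]
    refine pvFold_nodup _ _ _ _ _ (pvFold_nodup _ _ _ _ _ (fun x => ?_)) x
    simp [PySem.Dict.getD_empty, PySem.Dict.keys_empty]
  -- A's loop as map-over-filter
  have hstep : (fun (col : List (String × Int)) y =>
        if (x, y) ∈ balls then col ++ [("O", y)]
        else if (x, y) ∈ cubes then col ++ [("#", y)] else col)
      = (fun acc y => if (decide ((x, y) ∈ balls) || decide ((x, y) ∈ cubes)) = true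
            then acc ++ [((if (x, y) ∈ balls then "O" else "#"), y)] else acc) := by
    funext acc y
    by_cases h1 : (x, y) ∈ balls <;> by_cases h2 : (x, y) ∈ cubes <;> simp [h1, h2]
  rw [hstep, PySem.List.foldl_append_if, List.nil_append]
  -- B's sorted keys as the same filter
  have hmemkeys : ∀ y, y ∈ col.keys ↔ (col.get? y).isSome := by
    intro y
    rw [← not_iff_not, ← PySem.Dict.get?_eq_none_iff_not_mem_keys]
    cases col.get? y <;> simp
  have hkeys : PySem.List.sorted col.keys (fun y => y) false
      = (PySem.List.pyRange 0 h).filter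
          (fun y => decide ((x, y) ∈ balls) || decide ((x, y) ∈ cubes)) := by
    apply PySem.List.sorted_eq_of_perm_of_pairwise_lt
    · have hpw := (pvPyRange_pairwise h).filter
        (fun y => decide ((x, y) ∈ balls) || decide ((x, y) ∈ cubes))
      refine (List.perm_ext_iff_of_nodup (hpw.imp ne_of_lt) hnod).mpr (fun y => ?_)
      rw [List.mem_filter, PySem.List.mem_pyRange_one, hmemkeys, hget y]
      split_ifs with h1 h2 <;> simp <;> tauto
    · exact (pvPyRange_pairwise h).filter _
  rw [hkeys]
  refine List.map_congr_left (fun y hy => ?_)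
  rw [List.mem_filter, PySem.List.mem_pyRange_one] at hy
  obtain ⟨⟨hy0, hyh⟩, hp⟩ := hy
  have : col.getD y "" = if (x, y) ∈ balls then "O" else "#" := by
    rw [PySem.Dict.getD_eq_get?_getD, hget y]
    by_cases h1 : (x, y) ∈ balls
    · rw [if_pos ⟨hy0, hyh, h1⟩, if_pos h1]; rfl
    · have h2 : (x, y) ∈ cubes := by
        simp only [Bool.or_eq_true, decide_eq_true_eq] at hp
        tauto
      rw [if_neg (fun hc => h1 hc.2.2), if_pos ⟨hy0, hyh, h2⟩, if_neg h1]; rfl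
  rw [this]

-- ===== VERDICT (by name: the statement is the Claim_ definition above) =====
theorem get_cols_spec : Claim_equal_get_cols := by
  intro balls cubes shape _ _
  unfold Spec_get_cols get_cols get_cols_alt
  by_cases hw0 : (PySem.List.pyGet? shape 0).getD 0 ≤ 0
  · rw [if_pos hw0]
    have he : PySem.List.pyRange 0 ((PySem.List.pyGet? shape 0).getD 0) = [] := by
      rw [List.eq_nil_iff_forall_not_mem]
      intro z hz
      have := PySem.List.mem_pyRange_one.mp hz
      omega
    rw [he]
    rfl
  · rw [if_neg hw0]
    rw [PySem.List.foldl_append_singleton_eq_map, List.nil_append]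
    refine List.map_congr_left (fun x hxm => ?_)
    have hx := PySem.List.mem_pyRange_one.mp hxm
    exact pvCol_eq balls cubes _ _ x hx
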